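-- pv_equiv track=rewrite | github.com/rush2catch/algorithms-leetcode | Basic Data Structures/array/leet_605_CanPlaceFlowers.py | place_flowers
-- ===== SOURCE A (Python) =====
-- def place_flowers(flowerbed, n):
--
-- 	count = 1
-- 	result = 0
--
-- 	for i in range(len(flowerbed)):
-- 		if flowerbed[i] == 0:
-- 			count += 1
-- 		else:
-- 			result += int((count - 1) / 2)
-- 			count = 0
--
-- 	if count != 0:
-- 		result += int(count / 2)
--
-- 	return result >= n
-- ===== SOURCE B (Python) =====
-- def place_flowers(flowerbed, n):
--     count = 0
--     prev = 0
--     last = len(flowerbed) - 1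
--     for i, cur in enumerate(flowerbed):
--         if cur == 0 and prev == 0 and (i == last or flowerbed[i + 1] == 0):
--             count += 1
--             prev = 1
--         else:
--             prev = cur
--     return count >= n
-- ===== Notes on version B (the rewrite author's own statement) =====
-- stated objective: idiomatic
-- what changed: Replaces A's zero-run accumulation (count run lengths, add int((run-1)/2) per run via float division, plus an end correction) with the standard one-pass greedy that plants a flower whenever the current cell and its effective neighbours are empty, tracked by a prev variable; constant-factor faster by avoiding the per-run float division/int() work.
import Mathlib
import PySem

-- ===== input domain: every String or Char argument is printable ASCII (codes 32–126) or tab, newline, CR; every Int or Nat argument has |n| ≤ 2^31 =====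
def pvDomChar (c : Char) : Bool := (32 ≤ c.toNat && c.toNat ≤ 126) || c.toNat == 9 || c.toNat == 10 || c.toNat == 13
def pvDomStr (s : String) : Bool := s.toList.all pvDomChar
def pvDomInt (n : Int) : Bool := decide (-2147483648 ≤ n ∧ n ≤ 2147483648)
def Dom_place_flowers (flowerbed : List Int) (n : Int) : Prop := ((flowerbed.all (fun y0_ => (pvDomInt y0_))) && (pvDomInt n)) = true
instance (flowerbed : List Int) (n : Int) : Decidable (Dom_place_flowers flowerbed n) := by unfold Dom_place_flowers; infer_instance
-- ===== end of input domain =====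

-- B replaces A's zero-run accumulation with the standard one-pass greedy (plant when the
-- current cell and its effective neighbours are empty, tracked by a `prev` variable);
-- same O(n) cost, more idiomatic. Neither program mutates its arguments.

-- ===== PORT A =====
-- A's loop state: (count, result).  Python's `int((count - 1) / 2)` truncates toward
-- zero (exact here: count ≤ len(flowerbed) + 1, far below float precision), so it is
-- ported as Int.tdiv.
def place_flowers (flowerbed : List Int) (n : Int) : Bool :=
  let st := flowerbed.foldl
    (fun (s : Int × Int) x =>
      if x = 0 then (s.1 + 1, s.2) else (0, s.2 + (s.1 - 1).tdiv 2))
    (1, 0)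
  let result := if st.1 ≠ 0 then st.2 + st.1.tdiv 2 else st.2
  decide (result ≥ n)

-- ===== PORT B =====
-- B's loop: `prev` is the effective value of the previous cell, `count` the flowers
-- planted so far; the `i == last or flowerbed[i+1] == 0` look-ahead becomes a match
-- on the tail of the list.
def pfGreedy : List Int → Int → Int → Int
  | [], _, count => count
  | cur :: rest, prev, count =>
    if cur = 0 ∧ prev = 0 ∧ (rest = [] ∨ rest.head? = some 0) then
      pfGreedy rest 1 (count + 1)
    else
      pfGreedy rest cur count

def place_flowers_alt (flowerbed : List Int) (n : Int) : Bool :=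
  decide (pfGreedy flowerbed 0 0 ≥ n)

-- ===== PRECONDITION & SPEC =====
def Spec_place_flowers (flowerbed : List Int) (n : Int) (out : Bool) : Prop := out = place_flowers_alt flowerbed n
instance (flowerbed : List Int) (n : Int) (out : Bool) : Decidable (Spec_place_flowers flowerbed n out) := by unfold Spec_place_flowers; infer_instance

-- ===== CLAIM (what is proved, stated in full; the proofs are below) =====
def Claim_equal_place_flowers : Prop := ∀ (flowerbed : List Int) (n : Int), Dom_place_flowers flowerbed n → Spec_place_flowers flowerbed n (place_flowers flowerbed n)

-- ===== LEMMAS AND PROOFS =====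

-- A's loop step and finalization, named for the proofs.
def pfStep (s : Int × Int) (x : Int) : Int × Int :=
  if x = 0 then (s.1 + 1, s.2) else (0, s.2 + (s.1 - 1).tdiv 2)

def pfFin (s : Int × Int) : Int :=
  if s.1 ≠ 0 then s.2 + s.1.tdiv 2 else s.2

lemma place_flowers_eq (flowerbed : List Int) (n : Int) :
    place_flowers flowerbed n = decide (pfFin (flowerbed.foldl pfStep (1, 0)) ≥ n) := rfl

-- The loop invariant tying A's state (c, rA) to B's state (prev p, count rB)
-- over the remaining list l.
def pfInv (l : List Int) (c rA p rB : Int) : Prop :=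
  0 ≤ c ∧
  (p = 0 → 1 ≤ c ∧ rB = rA + (c - 1).tdiv 2 ∧
    (c % 2 = 0 → ∃ y t, l = y :: t ∧ y ≠ 0)) ∧
  (p ≠ 0 → c % 2 = 0 ∧ rB = rA + c.tdiv 2 ∧
    (c ≠ 0 → l = [] ∨ l.head? = some 0))

lemma tdiv2_nonneg (a : Int) (h : 0 ≤ a) : a.tdiv 2 = a / 2 := by
  rw [Int.tdiv_eq_ediv]; omega

lemma pf_key : ∀ (l : List Int) (c rA p rB : Int), pfInv l c rA p rB →
    pfFin (l.foldl pfStep (c, rA)) = pfGreedy l p rB := by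
  intro l
  induction l with
  | nil =>
    intro c rA p rB ⟨hc, h0, h1⟩
    simp only [List.foldl_nil, pfGreedy, pfFin]
    have e0 := tdiv2_nonneg c hc
    by_cases hp : p = 0
    · obtain ⟨hc1, hrB, hpar⟩ := h0 hp
      have hodd : c % 2 = 1 := by
        rcases Int.emod_two_eq_zero_or_one c with h | h
        · obtain ⟨y, t, hyt, -⟩ := hpar h; cases hyt
        · exact h
      have e1 := tdiv2_nonneg (c - 1) (by omega)
      rw [if_pos (by omega : c ≠ 0)]
      omega
    · obtain ⟨hpar, hrB, -⟩ := h1 hp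
      by_cases hc0 : c = 0
      · subst hc0; simp [hrB]
      · rw [if_pos hc0]; omega
  | cons x rest ih =>
    intro c rA p rB ⟨hc, h0, h1⟩
    simp only [List.foldl_cons]
    by_cases hx : x = 0
    · subst hx
      have hstep : pfStep (c, rA) 0 = (c + 1, rA) := by simp [pfStep]
      rw [hstep]
      by_cases hp : p = 0
      · obtain ⟨hc1, hrB, hpar⟩ := h0 hp
        have hodd : c % 2 = 1 := by
          rcases Int.emod_two_eq_zero_or_one c with h | h
          · obtain ⟨y, t, hyt, hy⟩ := hpar h; cases hyt; exact absurd rfl hy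
          · exact h
        have e1 := tdiv2_nonneg (c - 1) (by omega)
        have e2 := tdiv2_nonneg (c + 1) (by omega)
        have e3 := tdiv2_nonneg (c + 1 - 1) (by omega)
        by_cases hplant : rest = [] ∨ rest.head? = some 0
        · -- B plants here
          have hgr : pfGreedy (0 :: rest) p rB = pfGreedy rest 1 (rB + 1) := by
            simp only [pfGreedy]
            rw [if_pos (by exact ⟨by trivial, hp, hplant⟩)]
          rw [hgr]
          apply ih
          refine ⟨by omega, fun h => absurd h (by norm_num),
            fun _ => ⟨by omega, by omega, fun _ => hplant⟩⟩
        · -- B does not plant: the next cell exists and is nonzero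
          have hgr : pfGreedy (0 :: rest) p rB = pfGreedy rest 0 rB := by
            simp only [pfGreedy]
            rw [if_neg (by rintro ⟨-, -, h⟩; exact hplant h)]
          rw [hgr]
          apply ih
          refine ⟨by omega, fun _ => ⟨by omega, by omega, fun _ => ?_⟩,
            fun h => absurd rfl h⟩
          cases rest with
          | nil => exact absurd (Or.inl rfl) hplant
          | cons y t =>
            refine ⟨y, t, rfl, fun hy0 => ?_⟩
            subst hy0; exact hplant (Or.inr rfl)
      · obtain ⟨hpar, hrB, -⟩ := h1 hp
        have e0 := tdiv2_nonneg c hc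
        have e2 := tdiv2_nonneg (c + 1) (by omega)
        have e3 := tdiv2_nonneg (c + 1 - 1) (by omega)
        have hgr : pfGreedy (0 :: rest) p rB = pfGreedy rest 0 rB := by
          simp only [pfGreedy]
          rw [if_neg (by rintro ⟨-, h, -⟩; exact hp h)]
        rw [hgr]
        apply ih
        exact ⟨by omega, fun _ => ⟨by omega, by omega,
          fun h => absurd (by omega : c % 2 = 1) (by omega)⟩,
          fun h => absurd rfl h⟩
    · -- x ≠ 0: A closes the current run, B records prev = x
      have hstep : pfStep (c, rA) x = (0, rA + (c - 1).tdiv 2) := by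
        simp [pfStep, hx]
      rw [hstep]
      have hgr : pfGreedy (x :: rest) p rB = pfGreedy rest x rB := by
        simp only [pfGreedy]
        rw [if_neg (by rintro ⟨h, -, -⟩; exact hx h)]
      rw [hgr]
      have hrB : rB = rA + (c - 1).tdiv 2 := by
        by_cases hp : p = 0
        · exact (h0 hp).2.1
        · obtain ⟨hpar, hrB, hz⟩ := h1 hp
          have hc0 : c = 0 := by
            by_contra hc0
            rcases hz hc0 with h | h
            · cases h
            · simp only [List.head?] at h
              exact hx (by injection h)
          subst hc0
          have t1 : ((0:Int) - 1).tdiv 2 = 0 := by decide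
          have t2 : Int.tdiv 0 2 = 0 := by decide
          omega
      apply ih
      refine ⟨le_refl 0, fun h => absurd h hx,
        fun _ => ⟨by decide, ?_, fun h => absurd rfl h⟩⟩
      have t2 : Int.tdiv 0 2 = 0 := by decide
      omega

-- ===== VERDICT (by name: the statement is the Claim_ definition above) =====
theorem place_flowers_spec : Claim_equal_place_flowers := by
  intro flowerbed n _
  unfold Spec_place_flowers place_flowers_alt
  rw [place_flowers_eq]
  have h := pf_key flowerbed 1 0 0 0
    ⟨by decide, fun _ => ⟨le_refl 1, by decide, by intro h; cases h⟩, fun h => absurd rfl h⟩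
  rw [h]
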